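-- pv_equiv track=rewrite | github.com/LeadNess/vk-news-dashboard | app/preprocessing.py | parse_title
-- ===== SOURCE A (Python) =====
-- def parse_title(title: str) -> str:
--     if len(title) < 80:
--         return title
--     processed_title = ''
--     one_newline = False
--     for i, ch in enumerate(title):
--         if 60 < i < 120 and ch == ' ' and not one_newline:
--             processed_title += '<br>'
--             one_newline = True
--         if 120 < i < 180 and ch == ' ' and one_newline:
--             processed_title += '<br>'
--             one_newline = False
--         if 180 < i and ch == ' ' and not one_newline:
--             processed_title += '<br>'
--             one_newline = True
--         else:
--             processed_title += ch
--     return processed_title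
-- ===== SOURCE B (Python) =====
-- def parse_title(title: str) -> str:
--     if len(title) < 80:
--         return title
--     # Break the title into lines of roughly 60-120 characters at spaces:
--     # the first two line breaks go in front of the space, a final late
--     # break replaces its space.
--     b1 = title.find(' ', 61, 120)
--     if b1 == -1:
--         b3 = title.find(' ', 181)
--         if b3 == -1:
--             return title
--         return title[:b3] + '<br>' + title[b3 + 1:]
--     b2 = title.find(' ', 121, 180)
--     if b2 == -1:
--         return title[:b1] + '<br>' + title[b1:]
--     b3 = title.find(' ', 181)
--     if b3 == -1:
--         return title[:b1] + '<br>' + title[b1:b2] + '<br>' + title[b2:]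
--     return (title[:b1] + '<br>' + title[b1:b2] + '<br>' + title[b2:b3]
--             + '<br>' + title[b3 + 1:])
-- ===== Notes on version B (the rewrite author's own statement) =====
-- stated objective: alternative
-- what changed: B replaces A's single character-by-character scan with a toggling flag by locating the at most three break positions with str.find(start, end) and assembling the result from string slices.
import Mathlib
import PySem

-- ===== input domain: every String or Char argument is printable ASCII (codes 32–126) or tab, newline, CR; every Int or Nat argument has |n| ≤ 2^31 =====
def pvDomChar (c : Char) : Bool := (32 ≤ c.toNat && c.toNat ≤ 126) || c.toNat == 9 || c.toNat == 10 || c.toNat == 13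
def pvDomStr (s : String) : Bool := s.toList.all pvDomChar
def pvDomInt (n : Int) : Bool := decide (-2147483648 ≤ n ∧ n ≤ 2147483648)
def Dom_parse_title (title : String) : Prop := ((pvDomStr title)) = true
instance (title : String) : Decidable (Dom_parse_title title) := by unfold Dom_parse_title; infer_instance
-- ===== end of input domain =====

-- B locates the at most three break positions with find(start, end) and assembles the
-- result from slices, instead of A's character-by-character scan with a toggling flag;
-- alternative decomposition, same cost.

-- ===== PORT A =====
-- A's loop body: the three ifs in order, threading (processed_title, one_newline).
def pvStepA (i : Nat) (ch : Char) (st : List Char × Bool) : List Char × Bool :=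
  let s1 : List Char × Bool :=
    if 60 < i ∧ i < 120 ∧ ch = ' ' ∧ st.2 = false then (st.1 ++ ['<','b','r','>'], true) else st
  let s2 : List Char × Bool :=
    if 120 < i ∧ i < 180 ∧ ch = ' ' ∧ s1.2 = true then (s1.1 ++ ['<','b','r','>'], false) else s1
  if 180 < i ∧ ch = ' ' ∧ s2.2 = false then (s2.1 ++ ['<','b','r','>'], true)
  else (s2.1 ++ [ch], s2.2)

def pvLoopA : List Char → Nat → List Char × Bool → List Char
  | [], _, st => st.1
  | ch :: rest, i, st => pvLoopA rest (i + 1) (pvStepA i ch st)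

def parse_title (title : String) : String :=
  if title.toList.length < 80 then title
  else String.ofList (pvLoopA title.toList 0 ([], false))

-- ===== PORT B =====
-- Source B: find the break positions with str.find(' ', start, end), then assemble slices;
-- title.find(' ', a, b) is PySem.Chars.findFrom, title[a:b] is PySem.List.slice.
def parse_title_alt (title : String) : String :=
  if title.toList.length < 80 then title
  else
    let cs := title.toList
    let br : List Char := ['<','b','r','>']
    let b1 := PySem.Chars.findFrom cs [' '] 61 (some 120)
    if b1 = -1 then
      let b3 := PySem.Chars.findFrom cs [' '] 181 none
      if b3 = -1 then title
      else String.ofList (PySem.List.slice cs none (some b3) ++ br ++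
             PySem.List.slice cs (some (b3 + 1)) none)
    else
      let b2 := PySem.Chars.findFrom cs [' '] 121 (some 180)
      if b2 = -1 then
        String.ofList (PySem.List.slice cs none (some b1) ++ br ++
          PySem.List.slice cs (some b1) none)
      else
        let b3 := PySem.Chars.findFrom cs [' '] 181 none
        if b3 = -1 then
          String.ofList (PySem.List.slice cs none (some b1) ++ br ++
            PySem.List.slice cs (some b1) (some b2) ++ br ++
            PySem.List.slice cs (some b2) none)
        else
          String.ofList (PySem.List.slice cs none (some b1) ++ br ++
            PySem.List.slice cs (some b1) (some b2) ++ br ++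
            PySem.List.slice cs (some b2) (some b3) ++ br ++
            PySem.List.slice cs (some (b3 + 1)) none)

-- ===== PRECONDITION & SPEC =====
def Spec_parse_title (title : String) (out : String) : Prop := out = parse_title_alt title
instance (title : String) (out : String) : Decidable (Spec_parse_title title out) := by unfold Spec_parse_title; infer_instance

-- ===== CLAIM (what is proved, stated in full; the proofs are below) =====
def Claim_equal_parse_title : Prop := ∀ (title : String), Dom_parse_title title → Spec_parse_title title (parse_title title)

-- ===== LEMMAS AND PROOFS =====

-- first index i with lo ≤ i < hi whose character is a space (the canonical break search)
def pvFirstSpace : List Char → Nat → Nat → Nat → Option Nat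
  | [], _, _, _ => none
  | ch :: rest, lo, hi, i =>
    if lo ≤ i ∧ i < hi ∧ ch = ' ' then some i else pvFirstSpace rest lo hi (i + 1)

def pvB1 (cs : List Char) : Option Nat := pvFirstSpace cs 61 120 0
def pvB2 (cs : List Char) : Option Nat :=
  if (pvB1 cs).isSome then pvFirstSpace cs 121 180 0 else none
def pvB3 (cs : List Char) : Option Nat :=
  if (pvB1 cs).isNone || (pvB2 cs).isSome then pvFirstSpace cs 181 cs.length 0 else none

-- reference assembly: copy characters, inserting '<br>' at the break positions
def pvBuildB : List Char → Nat → Option Nat → Option Nat → Option Nat → List Char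
  | [], _, _, _, _ => []
  | ch :: rest, i, b1, b2, b3 =>
    (if some i = b1 ∨ some i = b2 then '<' :: 'b' :: 'r' :: '>' :: [ch]
     else if some i = b3 then ['<','b','r','>']
     else [ch]) ++ pvBuildB rest (i + 1) b1 b2 b3

-- the flag A's loop carries before processing index k, expressed via the break positions
def pvLtOpt (o : Option Nat) (k : Nat) : Bool :=
  match o with
  | some j => j < k
  | none => false

def pvFlagAt (cs : List Char) (k : Nat) : Bool :=
  (pvLtOpt (pvB1 cs) k && !(pvLtOpt (pvB2 cs) k)) || pvLtOpt (pvB3 cs) k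

theorem pvFirstSpace_some : ∀ (cs : List Char) (lo hi i j : Nat),
    pvFirstSpace cs lo hi i = some j →
    lo ≤ j ∧ j < hi ∧ i ≤ j ∧ cs[j - i]? = some ' ' ∧
      ∀ m, lo ≤ m → i ≤ m → m < j → cs[m - i]? ≠ some ' ' := by
  intro cs
  induction cs with
  | nil => intro lo hi i j h; simp [pvFirstSpace] at h
  | cons c rest ih =>
    intro lo hi i j h
    simp only [pvFirstSpace] at h
    split at h
    · rename_i hc
      obtain ⟨h1, h2, h3⟩ := hc
      cases h
      refine ⟨h1, h2, le_refl _, ?_, ?_⟩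
      · simp [h3]
      · intro m _ him hmj; omega
    · rename_i hc
      obtain ⟨h1, h2, h3, h4, h5⟩ := ih lo hi (i + 1) j h
      refine ⟨h1, h2, by omega, ?_, ?_⟩
      · have he : j - i = (j - (i + 1)) + 1 := by omega
        rw [he]; simpa using h4
      · intro m hlo him hmj
        rcases Nat.eq_or_lt_of_le him with he | hlt
        · subst he
          simp only [Nat.sub_self, List.getElem?_cons_zero]
          intro hsp
          exact hc ⟨hlo, by omega, Option.some.inj hsp⟩
        · have he : m - i = (m - (i + 1)) + 1 := by omega
          rw [he]
          simpa using h5 m hlo (by omega) hmj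

theorem pvFirstSpace_none : ∀ (cs : List Char) (lo hi i : Nat),
    pvFirstSpace cs lo hi i = none →
    ∀ m, lo ≤ m → m < hi → i ≤ m → cs[m - i]? ≠ some ' ' := by
  intro cs
  induction cs with
  | nil => intro lo hi i _ m _ _ _; simp
  | cons c rest ih =>
    intro lo hi i h m hlo hhi him
    simp only [pvFirstSpace] at h
    split at h
    · exact absurd h (by simp)
    · rename_i hc
      rcases Nat.eq_or_lt_of_le him with he | hlt
      · subst he
        simp only [Nat.sub_self, List.getElem?_cons_zero]
        intro hsp; exact hc ⟨hlo, hhi, Option.some.inj hsp⟩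
      · have he : m - i = (m - (i + 1)) + 1 := by omega
        rw [he]
        simpa using ih lo hi (i + 1) h m hlo hhi (by omega)

theorem pvB1_some {cs : List Char} {j : Nat} (h : pvB1 cs = some j) :
    61 ≤ j ∧ j < 120 ∧ cs[j]? = some ' ' ∧ ∀ m, 61 ≤ m → m < j → cs[m]? ≠ some ' ' := by
  obtain ⟨h1, h2, _, h4, h5⟩ := pvFirstSpace_some cs 61 120 0 j h
  simp only [Nat.sub_zero] at h4 h5
  exact ⟨h1, h2, h4, fun m hm hmj => h5 m hm (Nat.zero_le _) hmj⟩

theorem pvB1_none {cs : List Char} (h : pvB1 cs = none) :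
    ∀ m, 61 ≤ m → m < 120 → cs[m]? ≠ some ' ' := by
  intro m h1 h2
  have := pvFirstSpace_none cs 61 120 0 h m h1 h2 (Nat.zero_le _)
  simpa using this

theorem pvB2_some {cs : List Char} {j : Nat} (h : pvB2 cs = some j) :
    121 ≤ j ∧ j < 180 ∧ cs[j]? = some ' ' ∧ (pvB1 cs).isSome ∧
      ∀ m, 121 ≤ m → m < j → cs[m]? ≠ some ' ' := by
  unfold pvB2 at h
  split at h
  · rename_i hb1
    obtain ⟨h1, h2, _, h4, h5⟩ := pvFirstSpace_some cs 121 180 0 j h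
    simp only [Nat.sub_zero] at h4 h5
    exact ⟨h1, h2, h4, hb1, fun m hm hmj => h5 m hm (Nat.zero_le _) hmj⟩
  · simp at h

theorem pvB2_none {cs : List Char} (h : pvB2 cs = none) (hb1 : (pvB1 cs).isSome) :
    ∀ m, 121 ≤ m → m < 180 → cs[m]? ≠ some ' ' := by
  intro m h1 h2
  unfold pvB2 at h
  rw [if_pos hb1] at h
  have := pvFirstSpace_none cs 121 180 0 h m h1 h2 (Nat.zero_le _)
  simpa using this

theorem pvB3_some {cs : List Char} {j : Nat} (h : pvB3 cs = some j) :
    181 ≤ j ∧ cs[j]? = some ' ' ∧ ((pvB1 cs).isNone ∨ (pvB2 cs).isSome) ∧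
      ∀ m, 181 ≤ m → m < j → cs[m]? ≠ some ' ' := by
  unfold pvB3 at h
  split at h
  · rename_i hg
    obtain ⟨h1, _, _, h4, h5⟩ := pvFirstSpace_some cs 181 cs.length 0 j h
    simp only [Nat.sub_zero] at h4 h5
    refine ⟨h1, h4, ?_, fun m hm hmj => h5 m hm (Nat.zero_le _) hmj⟩
    rcases Bool.or_eq_true_iff.mp hg with h' | h'
    · exact Or.inl h'
    · exact Or.inr h'
  · simp at h

theorem pvB3_none {cs : List Char} (h : pvB3 cs = none)
    (hg : (pvB1 cs).isNone ∨ (pvB2 cs).isSome) :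
    ∀ m, 181 ≤ m → m < cs.length → cs[m]? ≠ some ' ' := by
  intro m h1 h2
  unfold pvB3 at h
  rw [if_pos (by rcases hg with h' | h' <;> simp [h'])] at h
  have := pvFirstSpace_none cs 181 cs.length 0 h m h1 h2 (Nat.zero_le _)
  simpa using this

theorem pvGetLt {cs : List Char} {k : Nat} {c : Char} (hc : cs[k]? = some c) : k < cs.length := by
  obtain ⟨h, _⟩ := List.getElem?_eq_some_iff.mp hc
  exact h

theorem pvFireB1 (cs : List Char) (k : Nat) (c : Char) (hc : cs[k]? = some c) :
    pvB1 cs = some k ↔ (60 < k ∧ k < 120 ∧ c = ' ' ∧ pvFlagAt cs k = false) := by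
  constructor
  · intro h
    obtain ⟨h1, h2, h3, _⟩ := pvB1_some h
    refine ⟨by omega, h2, by rw [hc] at h3; exact Option.some.inj h3, ?_⟩
    unfold pvFlagAt
    rw [h]
    have e1 : pvLtOpt (some k) k = false := by simp [pvLtOpt]
    rw [e1]
    rcases hb3 : pvB3 cs with _ | j3
    · simp [pvLtOpt]
    · obtain ⟨g1, _, _, _⟩ := pvB3_some hb3
      simp [pvLtOpt]; omega
  · rintro ⟨hk1, hk2, hsp, hfl⟩
    subst hsp
    unfold pvFlagAt at hfl
    have hb3f : pvLtOpt (pvB3 cs) k = false := by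
      rcases hb3 : pvB3 cs with _ | j3
      · simp [pvLtOpt]
      · obtain ⟨g1, _, _, _⟩ := pvB3_some hb3
        simp [pvLtOpt]; omega
    rw [hb3f] at hfl
    simp only [Bool.or_false, Bool.and_eq_false_iff] at hfl
    rcases hb1 : pvB1 cs with _ | j1
    · exact absurd hc (pvB1_none hb1 k (by omega) hk2)
    · obtain ⟨g1, g2, g3, g4⟩ := pvB1_some hb1
      rcases hfl with hfl | hfl
      · rw [hb1] at hfl
        simp [pvLtOpt] at hfl
        have : ¬ k < j1 := fun hlt => g4 k (by omega) hlt hc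
        have : j1 = k := by omega
        rw [this]
      · rcases hb2 : pvB2 cs with _ | j2
        · rw [hb2] at hfl; simp [pvLtOpt] at hfl
        · obtain ⟨e1, _, _, _, _⟩ := pvB2_some hb2
          rw [hb2] at hfl; simp [pvLtOpt] at hfl; omega

theorem pvFireB2 (cs : List Char) (k : Nat) (c : Char) (hc : cs[k]? = some c) :
    pvB2 cs = some k ↔ (120 < k ∧ k < 180 ∧ c = ' ' ∧ pvFlagAt cs k = true) := by
  constructor
  · intro h
    obtain ⟨h1, h2, h3, hb1s, _⟩ := pvB2_some h
    obtain ⟨j1, hb1⟩ := Option.isSome_iff_exists.mp hb1s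
    obtain ⟨g1, g2, _, _⟩ := pvB1_some hb1
    refine ⟨by omega, h2, by rw [hc] at h3; exact Option.some.inj h3, ?_⟩
    unfold pvFlagAt
    rw [h, hb1]
    have e2 : pvLtOpt (some k) k = false := by simp [pvLtOpt]
    have e1 : pvLtOpt (some j1) k = true := by simp [pvLtOpt]; omega
    rw [e1, e2]
    simp
  · rintro ⟨hk1, hk2, hsp, hfl⟩
    subst hsp
    unfold pvFlagAt at hfl
    have hb3f : pvLtOpt (pvB3 cs) k = false := by
      rcases hb3 : pvB3 cs with _ | j3
      · simp [pvLtOpt]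
      · obtain ⟨g1, _, _, _⟩ := pvB3_some hb3
        simp [pvLtOpt]; omega
    rw [hb3f] at hfl
    simp only [Bool.or_false, Bool.and_eq_true] at hfl
    obtain ⟨hf1, hf2⟩ := hfl
    have hb1s : (pvB1 cs).isSome := by
      rcases hb1 : pvB1 cs with _ | j1
      · rw [hb1] at hf1; simp [pvLtOpt] at hf1
      · simp
    rcases hb2 : pvB2 cs with _ | j2
    · exact absurd hc (pvB2_none hb2 hb1s k (by omega) hk2)
    · obtain ⟨e1, e2, e3, _, e5⟩ := pvB2_some hb2
      rw [hb2] at hf2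
      simp [pvLtOpt] at hf2
      have : ¬ k < j2 := fun hlt => e5 k (by omega) hlt hc
      have : j2 = k := by omega
      rw [this]

theorem pvFireB3 (cs : List Char) (k : Nat) (c : Char) (hc : cs[k]? = some c) :
    pvB3 cs = some k ↔ (180 < k ∧ c = ' ' ∧ pvFlagAt cs k = false) := by
  constructor
  · intro h
    obtain ⟨h1, h3, hg, _⟩ := pvB3_some h
    refine ⟨by omega, by rw [hc] at h3; exact Option.some.inj h3, ?_⟩
    unfold pvFlagAt
    rw [h]
    have e3 : pvLtOpt (some k) k = false := by simp [pvLtOpt]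
    rw [e3]
    rcases hg with hg | hg
    · rw [Option.isNone_iff_eq_none.mp hg]
      simp [pvLtOpt]
    · obtain ⟨j2, hb2⟩ := Option.isSome_iff_exists.mp hg
      obtain ⟨e1, e2, _, _, _⟩ := pvB2_some hb2
      rw [hb2]
      have : pvLtOpt (some j2) k = true := by simp [pvLtOpt]; omega
      rw [this]
      simp
  · rintro ⟨hk1, hsp, hfl⟩
    subst hsp
    unfold pvFlagAt at hfl
    simp only [Bool.or_eq_false_iff, Bool.and_eq_false_iff] at hfl
    obtain ⟨hf12, hf3⟩ := hfl
    have hg : (pvB1 cs).isNone ∨ (pvB2 cs).isSome := by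
      rcases hf12 with hf | hf
      · rcases hb1 : pvB1 cs with _ | j1
        · exact Or.inl rfl
        · obtain ⟨g1, g2, _, _⟩ := pvB1_some hb1
          rw [hb1] at hf; simp [pvLtOpt] at hf; omega
      · rcases hb2 : pvB2 cs with _ | j2
        · rw [hb2] at hf; simp [pvLtOpt] at hf
        · exact Or.inr rfl
    rcases hb3 : pvB3 cs with _ | j3
    · exact absurd hc (pvB3_none hb3 hg k (by omega) (pvGetLt hc))
    · obtain ⟨e1, e2, _, e4⟩ := pvB3_some hb3
      rw [hb3] at hf3
      simp [pvLtOpt] at hf3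
      have : ¬ k < j3 := fun hlt => e4 k (by omega) hlt hc
      have : j3 = k := by omega
      rw [this]

theorem pvFlagSucc (cs : List Char) (k : Nat) :
    pvFlagAt cs (k + 1)
      = if pvB1 cs = some k ∨ pvB3 cs = some k then true
        else if pvB2 cs = some k then false
        else pvFlagAt cs k := by
  unfold pvFlagAt
  rcases hb1 : pvB1 cs with _ | j1 <;> rcases hb2 : pvB2 cs with _ | j2 <;>
    rcases hb3 : pvB3 cs with _ | j3
  · split_ifs with h h' <;> simp_all [pvLtOpt]
  · obtain ⟨e1, _, _, e4⟩ := pvB3_some hb3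
    split_ifs with h h' <;> simp_all [pvLtOpt] <;> omega
  · obtain ⟨e1, e2, _, e4, _⟩ := pvB2_some hb2
    rw [hb1] at e4; simp at e4
  · obtain ⟨e1, e2, _, e4, _⟩ := pvB2_some hb2
    rw [hb1] at e4; simp at e4
  · obtain ⟨g1, g2, _, _⟩ := pvB1_some hb1
    split_ifs with h h' <;> simp_all [pvLtOpt] <;> omega
  · obtain ⟨g1, g2, _, _⟩ := pvB1_some hb1
    obtain ⟨e1, _, _, e4⟩ := pvB3_some hb3
    split_ifs with h h' <;> simp_all [pvLtOpt] <;> omega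
  · obtain ⟨g1, g2, _, _⟩ := pvB1_some hb1
    obtain ⟨e1, e2, _, _, _⟩ := pvB2_some hb2
    split_ifs with h h' <;> simp_all [pvLtOpt] <;>
      first
        | omega
        | (rw [Bool.eq_iff_iff]
           simp only [Bool.and_eq_true, Bool.or_eq_true, Bool.not_eq_true', decide_eq_true_eq,
             decide_eq_false_iff_not]
           omega)
  · obtain ⟨g1, g2, _, _⟩ := pvB1_some hb1
    obtain ⟨e1, e2, _, _, _⟩ := pvB2_some hb2
    obtain ⟨f1, _, _, _⟩ := pvB3_some hb3
    split_ifs with h h' <;> simp_all [pvLtOpt] <;>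
      first
        | omega
        | (rw [Bool.eq_iff_iff]
           simp only [Bool.and_eq_true, Bool.or_eq_true, Bool.not_eq_true', decide_eq_true_eq,
             decide_eq_false_iff_not]
           omega)

theorem pvStep (cs : List Char) (k : Nat) (c : Char) (hc : cs[k]? = some c)
    (acc : List Char) :
    pvStepA k c (acc, pvFlagAt cs k)
      = (acc ++ (if some k = pvB1 cs ∨ some k = pvB2 cs then '<' :: 'b' :: 'r' :: '>' :: [c]
                 else if some k = pvB3 cs then ['<','b','r','>']
                 else [c]),
         pvFlagAt cs (k + 1)) := by
  have hF1 := pvFireB1 cs k c hc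
  have hF2 := pvFireB2 cs k c hc
  have hF3 := pvFireB3 cs k c hc
  rw [pvFlagSucc]
  by_cases h1 : pvB1 cs = some k
  · obtain ⟨hk1, hk2, hsp, hfl⟩ := hF1.mp h1
    have hn2 : ¬ (120 : Nat) < k := by omega
    have hn3 : ¬ (180 : Nat) < k := by omega
    simp [pvStepA, h1, hfl, hsp, hk1, hk2, hn2, hn3]
  · by_cases h2 : pvB2 cs = some k
    · obtain ⟨hk1, hk2, hsp, hfl⟩ := hF2.mp h2
      have hn3 : ¬ (180 : Nat) < k := by omega
      have hn1 : ¬ k < 120 := by omega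
      have h3 : ¬ pvB3 cs = some k := fun h => hn3 (hF3.mp h).1
      simp [pvStepA, h1, h2, h3, hfl, hsp, hk1, hk2, hn1, hn3]
    · by_cases h3 : pvB3 cs = some k
      · obtain ⟨hk1, hsp, hfl⟩ := hF3.mp h3
        have hn1 : ¬ k < 120 := by omega
        have hn2 : ¬ k < 180 := by omega
        simp [pvStepA, h1, h2, h3, hfl, hsp, hk1, hn1, hn2]
        exact ⟨fun h => h1 h.symm, fun h => h2 h.symm⟩
      · have c1 : ¬ (60 < k ∧ k < 120 ∧ c = ' ' ∧ pvFlagAt cs k = false) :=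
          fun hx => h1 (hF1.mpr hx)
        have c2 : ¬ (120 < k ∧ k < 180 ∧ c = ' ' ∧ pvFlagAt cs k = true) :=
          fun hx => h2 (hF2.mpr hx)
        have c3 : ¬ (180 < k ∧ c = ' ' ∧ pvFlagAt cs k = false) :=
          fun hx => h3 (hF3.mpr hx)
        have e1 : ¬ some k = pvB1 cs := fun h => h1 h.symm
        have e2 : ¬ some k = pvB2 cs := fun h => h2 h.symm
        have e3 : ¬ some k = pvB3 cs := fun h => h3 h.symm
        simp [pvStepA, c1, c2, c3, e1, e2, e3, h1, h2, h3]

theorem pvLoop_eq (cs : List Char) : ∀ (l : List Char) (k : Nat) (acc : List Char),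
    cs.drop k = l →
    pvLoopA l k (acc, pvFlagAt cs k)
      = acc ++ pvBuildB l k (pvB1 cs) (pvB2 cs) (pvB3 cs) := by
  intro l
  induction l with
  | nil => intro k acc _; simp [pvLoopA, pvBuildB]
  | cons c rest ih =>
    intro k acc hdrop
    have hc : cs[k]? = some c := by
      have h0 : (cs.drop k)[0]? = cs[k + 0]? := List.getElem?_drop
      rw [hdrop] at h0
      simpa using h0.symm
    have hrest : cs.drop (k + 1) = rest := by
      have h0 : List.drop 1 (List.drop k cs) = List.drop (k + 1) cs := List.drop_drop
      rw [hdrop] at h0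
      simpa using h0.symm
    simp only [pvLoopA]
    rw [pvStep cs k c hc acc, ih (k + 1) _ hrest]
    simp [pvBuildB]

theorem pvFlagAt_zero (cs : List Char) : pvFlagAt cs 0 = false := by
  unfold pvFlagAt
  rcases h1 : pvB1 cs with _ | j1 <;> rcases h3 : pvB3 cs with _ | j3 <;>
    simp [pvLtOpt]

-- A = reference assembly
theorem pvA_eq_build (title : String) (h : ¬ title.toList.length < 80) :
    parse_title title
      = String.ofList (pvBuildB title.toList 0 (pvB1 title.toList) (pvB2 title.toList)
          (pvB3 title.toList)) := by
  unfold parse_title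
  rw [if_neg h]
  have h0 := pvLoop_eq title.toList title.toList 0 [] (by simp)
  rw [pvFlagAt_zero] at h0
  rw [h0]
  simp

-- ---- bridge: PySem.Chars.findFrom vs pvFirstSpace ----

theorem pvSingPrefix (c : Char) (xs : List Char) : [c] <+: xs ↔ xs[0]? = some c := by
  cases xs with
  | nil => simp
  | cons x t => simp [List.cons_prefix_cons, eq_comm]

theorem pvSingInfix (c : Char) (xs : List Char) : [c] <:+: xs ↔ c ∈ xs := by
  constructor
  · intro h; exact List.singleton_sublist.mp h.sublist
  · intro h
    obtain ⟨s, t, rfl⟩ := List.append_of_mem h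
    exact ⟨s, t, by simp⟩

-- index lemma for l = (cs.take hi).drop lo
theorem pvIdx (cs : List Char) (lo hi i : Nat) :
    ((cs.take hi).drop lo)[i]? = if lo + i < hi then cs[lo + i]? else none := by
  rw [List.getElem?_drop]
  simp [List.getElem?_take]

theorem pvCore (cs : List Char) (lo hi : Nat) :
    (if ((min cs.length hi : Nat) : Int) < (lo : Int) then (-1 : Int)
     else if PySem.Chars.find ((cs.take hi).drop lo) [' '] = -1 then -1
     else (lo : Int) + PySem.Chars.find ((cs.take hi).drop lo) [' ']) =
      (match pvFirstSpace cs lo hi 0 with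
       | some j => (j : Int)
       | none => -1) := by
  rcases h : pvFirstSpace cs lo hi 0 with _ | j
  · have hno : ∀ m, lo ≤ m → m < hi → cs[m]? ≠ some ' ' := by
      intro m h1 h2
      simpa using pvFirstSpace_none cs lo hi 0 h m h1 h2 (Nat.zero_le _)
    by_cases hfl : ((min cs.length hi : Nat) : Int) < (lo : Int)
    · rw [if_pos hfl]
    · rw [if_neg hfl]
      have hfind : PySem.Chars.find ((cs.take hi).drop lo) [' '] = -1 := by
        rw [PySem.Chars.find_eq_neg_one_iff, pvSingInfix]
        intro hm
        obtain ⟨i, hi2⟩ := List.mem_iff_getElem?.mp hm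
        rw [pvIdx] at hi2
        split at hi2
        · exact hno (lo + i) (by omega) (by omega) hi2
        · simp at hi2
      rw [if_pos hfind]
  · obtain ⟨h1, h2, _, h4, h5⟩ := pvFirstSpace_some cs lo hi 0 j h
    simp only [Nat.sub_zero] at h4 h5
    have hmin : ∀ m, lo ≤ m → m < j → cs[m]? ≠ some ' ' := fun m hm hmj =>
      h5 m hm (Nat.zero_le _) hmj
    have hj4 : j < cs.length := by
      obtain ⟨hx, _⟩ := List.getElem?_eq_some_iff.mp h4; exact hx
    have hfl : ¬ ((min cs.length hi : Nat) : Int) < (lo : Int) := by omega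
    rw [if_neg hfl]
    set l := (cs.take hi).drop lo with hl
    have hlj : l[j - lo]? = some ' ' := by
      rw [hl, pvIdx, if_pos (by omega)]
      rw [show lo + (j - lo) = j by omega]
      exact h4
    have hmem : ' ' ∈ l := List.mem_of_getElem? hlj
    have hpos : 0 ≤ PySem.Chars.find l [' '] :=
      (PySem.Chars.find_nonneg_iff l [' ']).mpr ((pvSingInfix _ _).mpr hmem)
    obtain ⟨hpre, hminf⟩ := PySem.Chars.find_spec hpos
    set t := (PySem.Chars.find l [' ']).toNat with ht
    have hlt : l[t]? = some ' ' := by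
      have hx := (pvSingPrefix ' ' (l.drop t)).mp hpre
      rw [List.getElem?_drop] at hx
      simpa using hx
    have htj : t = j - lo := by
      by_contra hne
      rcases Nat.lt_or_ge t (j - lo) with hc | hc
      · rw [pvIdx] at hlt
        split at hlt
        · exact hmin (lo + t) (by omega) (by omega) hlt
        · simp at hlt
      · have hc2 : j - lo < t := by omega
        apply hminf (j - lo) hc2
        rw [pvSingPrefix, List.getElem?_drop]
        simpa using hlj
    have hfv : PySem.Chars.find l [' '] = ((j - lo : Nat) : Int) := by
      rw [← htj, ht, Int.toNat_of_nonneg hpos]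
    rw [if_neg (by rw [hfv]; omega), hfv]
    push_cast
    omega

theorem pvTakeMin (cs : List Char) (hi : Nat) :
    cs.take (min cs.length hi) = cs.take hi := by
  rcases le_total cs.length hi with hle | hle
  · rw [Nat.min_eq_left hle, List.take_of_length_le (le_refl _),
      List.take_of_length_le hle]
  · rw [Nat.min_eq_right hle]

theorem pvFindFrom_eq (cs : List Char) (lo hi : Nat) :
    PySem.Chars.findFrom cs [' '] (lo : Int) (some (hi : Int)) =
      (match pvFirstSpace cs lo hi 0 with
       | some j => (j : Int)
       | none => -1) := by
  have hcore := pvCore cs lo hi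
  simp only [PySem.Chars.findFrom]
  have he : (if (cs.length : Int) < (hi : Int) then ((cs.length : Int))
      else if (hi : Int) < 0 then (if (hi : Int) + (cs.length : Int) < 0 then 0
        else (hi : Int) + (cs.length : Int)) else (hi : Int))
      = ((min cs.length hi : Nat) : Int) := by
    split_ifs <;> push_cast <;> omega
  rw [he]
  rw [if_neg (show ¬ (lo : Int) < 0 by omega)]
  simp only [Int.toNat_natCast]
  rw [pvTakeMin]
  exact hcore

theorem pvFindFrom_none_eq (cs : List Char) (lo : Nat) :
    PySem.Chars.findFrom cs [' '] (lo : Int) none =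
      (match pvFirstSpace cs lo cs.length 0 with
       | some j => (j : Int)
       | none => -1) := by
  have hcore := pvCore cs lo cs.length
  rw [show ((min cs.length cs.length : Nat) : Int) = (cs.length : Int) by
    rw [Nat.min_self]] at hcore
  simp only [PySem.Chars.findFrom]
  rw [if_neg (show ¬ (lo : Int) < 0 by omega)]
  simp only [Int.toNat_natCast]
  exact hcore

-- ---- assembly lemmas for pvBuildB ----

theorem pvBuild_append (b1 b2 b3 : Option Nat) :
    ∀ (l1 l2 : List Char) (k : Nat),
      pvBuildB (l1 ++ l2) k b1 b2 b3
        = pvBuildB l1 k b1 b2 b3 ++ pvBuildB l2 (k + l1.length) b1 b2 b3 := by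
  intro l1
  induction l1 with
  | nil => intro l2 k; simp [pvBuildB]
  | cons c t ih =>
    intro l2 k
    simp only [List.cons_append, pvBuildB, ih, List.length_cons, List.append_assoc]
    rw [show k + (t.length + 1) = k + 1 + t.length by omega]

theorem pvBuild_copy (b1 b2 b3 : Option Nat) :
    ∀ (l : List Char) (k : Nat),
      (∀ i, k ≤ i → i < k + l.length → some i ≠ b1 ∧ some i ≠ b2 ∧ some i ≠ b3) →
      pvBuildB l k b1 b2 b3 = l := by
  intro l
  induction l with
  | nil => intro k _; simp [pvBuildB]
  | cons c t ih =>
    intro k H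
    have hk := H k (le_refl _) (by simp)
    have hnot : ¬ (some k = b1 ∨ some k = b2) :=
      fun h => h.elim (fun h => hk.1 h) (fun h => hk.2.1 h)
    simp only [pvBuildB]
    rw [if_neg hnot, if_neg hk.2.2]
    simp only [List.singleton_append, List.cons.injEq, true_and]
    exact ih (k + 1) (fun i h1 h2 => H i (by omega) (by simp at h2 ⊢; omega))

theorem pvDrop_cons (cs : List Char) (j : Nat) (hj : cs[j]? = some ' ') :
    cs.drop j = ' ' :: cs.drop (j + 1) := by
  obtain ⟨hlt, hv⟩ := List.getElem?_eq_some_iff.mp hj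
  have h2 : cs[j] :: cs.drop (j + 1) = cs.drop j := List.getElem_cons_drop hlt
  rw [← h2, hv]

theorem pvBuild_keep (cs : List Char) (b1 b2 b3 : Option Nat) (j e : Nat)
    (hj : cs[j]? = some ' ') (hbr : some j = b1 ∨ some j = b2)
    (hcopy : ∀ i, j < i → i < e → some i ≠ b1 ∧ some i ≠ b2 ∧ some i ≠ b3)
    (hje : j < e) :
    pvBuildB ((cs.drop j).take (e - j)) j b1 b2 b3
      = '<' :: 'b' :: 'r' :: '>' :: (cs.drop j).take (e - j) := by
  rw [pvDrop_cons cs j hj]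
  rw [show e - j = (e - j - 1) + 1 by omega]
  rw [List.take_succ_cons]
  simp only [pvBuildB, if_pos hbr, List.cons_append, List.nil_append]
  have hcp : pvBuildB ((cs.drop (j + 1)).take (e - j - 1)) (j + 1) b1 b2 b3
      = (cs.drop (j + 1)).take (e - j - 1) := by
    apply pvBuild_copy
    intro i h1 h2
    apply hcopy i (by omega)
    have : ((cs.drop (j + 1)).take (e - j - 1)).length ≤ e - j - 1 := by
      simp [List.length_take]
    omega
  rw [hcp]

theorem pvBuild_last (cs : List Char) (b1 b2 b3 : Option Nat) (j : Nat)
    (hj : cs[j]? = some ' ') (hbr3 : some j = b3)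
    (h1 : some j ≠ b1) (h2 : some j ≠ b2)
    (hcopy : ∀ i, j < i → some i ≠ b1 ∧ some i ≠ b2 ∧ some i ≠ b3) :
    pvBuildB (cs.drop j) j b1 b2 b3
      = '<' :: 'b' :: 'r' :: '>' :: cs.drop (j + 1) := by
  rw [pvDrop_cons cs j hj]
  simp only [pvBuildB, if_neg (by tauto : ¬ (some j = b1 ∨ some j = b2)), if_pos hbr3,
    List.cons_append, List.nil_append]
  rw [pvBuild_copy b1 b2 b3 _ (j + 1) (fun i hi _ => hcopy i (by omega))]

-- ---- assembled form of pvBuildB for each break configuration ----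

theorem pvSeg_split (cs : List Char) (a b : Nat) (hab : a ≤ b) :
    (cs.drop a).take (b - a) ++ cs.drop b = cs.drop a := by
  have h1 : (cs.drop a).drop (b - a) = cs.drop b := by
    rw [List.drop_drop]; congr 1; omega
  rw [← h1, List.take_append_drop]

theorem pvDropTake_full (cs : List Char) (a : Nat) :
    (cs.drop a).take (cs.length - a) = cs.drop a := by
  rw [← List.length_drop]
  exact List.take_length

theorem pvLenTake (cs : List Char) (j : Nat) (h : j ≤ cs.length) :
    (cs.take j).length = j := by
  rw [List.length_take]; omega

theorem pvAssmNone (cs : List Char) :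
    pvBuildB cs 0 none none none = cs :=
  pvBuild_copy none none none cs 0 (by intro i _ _; refine ⟨?_, ?_, ?_⟩ <;> simp)

theorem pvAssm0 (cs : List Char) (j3 : Nat) (hsp : cs[j3]? = some ' ') :
    pvBuildB cs 0 none none (some j3)
      = cs.take j3 ++ ['<','b','r','>'] ++ cs.drop (j3 + 1) := by
  have hjn : j3 < cs.length := pvGetLt hsp
  calc pvBuildB cs 0 none none (some j3)
      = pvBuildB (cs.take j3 ++ cs.drop j3) 0 none none (some j3) :=
        congrArg (fun l => pvBuildB l 0 none none (some j3))
          (List.take_append_drop _ _).symm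
    _ = cs.take j3 ++ ['<','b','r','>'] ++ cs.drop (j3 + 1) := by
        rw [pvBuild_append, pvLenTake cs j3 (by omega),
          pvBuild_copy _ _ _ _ 0 (by
            intro i _ h2
            rw [pvLenTake cs j3 (by omega)] at h2
            refine ⟨by simp, by simp, by simp; omega⟩),
          Nat.zero_add,
          pvBuild_last cs none none (some j3) j3 hsp rfl (by simp) (by simp)
            (by intro i hi; refine ⟨by simp, by simp, by simp; omega⟩)]
        simp [List.append_assoc]

theorem pvAssm1 (cs : List Char) (j1 : Nat) (hsp : cs[j1]? = some ' ') :
    pvBuildB cs 0 (some j1) none none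
      = cs.take j1 ++ ['<','b','r','>'] ++ cs.drop j1 := by
  have hjn : j1 < cs.length := pvGetLt hsp
  calc pvBuildB cs 0 (some j1) none none
      = pvBuildB (cs.take j1 ++ cs.drop j1) 0 (some j1) none none :=
        congrArg (fun l => pvBuildB l 0 (some j1) none none)
          (List.take_append_drop _ _).symm
    _ = cs.take j1 ++ ['<','b','r','>'] ++ cs.drop j1 := by
        rw [pvBuild_append, pvLenTake cs j1 (by omega),
          pvBuild_copy _ _ _ _ 0 (by
            intro i _ h2
            rw [pvLenTake cs j1 (by omega)] at h2
            refine ⟨by simp; omega, by simp, by simp⟩),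
          Nat.zero_add,
          ← pvDropTake_full cs j1,
          pvBuild_keep cs (some j1) none none j1 cs.length hsp (Or.inl rfl)
            (by intro i hi1 hi2; refine ⟨by simp; omega, by simp, by simp⟩)
            (by omega)]
        simp [List.append_assoc]

theorem pvAssm2 (cs : List Char) (j1 j2 : Nat)
    (hsp1 : cs[j1]? = some ' ') (hsp2 : cs[j2]? = some ' ') (h12 : j1 < j2) :
    pvBuildB cs 0 (some j1) (some j2) none
      = cs.take j1 ++ ['<','b','r','>'] ++ (cs.drop j1).take (j2 - j1)
          ++ ['<','b','r','>'] ++ cs.drop j2 := by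
  have hj1n : j1 < cs.length := pvGetLt hsp1
  have hj2n : j2 < cs.length := pvGetLt hsp2
  have hlenS1 : ((cs.drop j1).take (j2 - j1)).length = j2 - j1 := by
    rw [List.length_take, List.length_drop]; omega
  have hX : cs.take j1 ++ ((cs.drop j1).take (j2 - j1) ++ cs.drop j2) = cs := by
    rw [pvSeg_split cs j1 j2 (by omega), List.take_append_drop]
  calc pvBuildB cs 0 (some j1) (some j2) none
      = pvBuildB (cs.take j1 ++ ((cs.drop j1).take (j2 - j1) ++ cs.drop j2)) 0
          (some j1) (some j2) none :=
        congrArg (fun l => pvBuildB l 0 (some j1) (some j2) none) hX.symm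
    _ = cs.take j1 ++ ['<','b','r','>'] ++ (cs.drop j1).take (j2 - j1)
          ++ ['<','b','r','>'] ++ cs.drop j2 := by
        rw [pvBuild_append, pvLenTake cs j1 (by omega),
          pvBuild_copy _ _ _ _ 0 (by
            intro i _ h2
            rw [pvLenTake cs j1 (by omega)] at h2
            refine ⟨by simp; omega, by simp; omega, by simp⟩),
          Nat.zero_add, pvBuild_append, hlenS1,
          show j1 + (j2 - j1) = j2 by omega,
          pvBuild_keep cs (some j1) (some j2) none j1 j2 hsp1 (Or.inl rfl)
            (by intro i hi1 hi2; refine ⟨by simp; omega, by simp; omega, by simp⟩)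
            h12,
          ← pvDropTake_full cs j2,
          pvBuild_keep cs (some j1) (some j2) none j2 cs.length hsp2 (Or.inr rfl)
            (by intro i hi1 hi2; refine ⟨by simp; omega, by simp; omega, by simp⟩)
            (by omega)]
        simp [List.append_assoc]

theorem pvAssm3 (cs : List Char) (j1 j2 j3 : Nat)
    (hsp1 : cs[j1]? = some ' ') (hsp2 : cs[j2]? = some ' ') (hsp3 : cs[j3]? = some ' ')
    (h12 : j1 < j2) (h23 : j2 < j3) :
    pvBuildB cs 0 (some j1) (some j2) (some j3)
      = cs.take j1 ++ ['<','b','r','>'] ++ (cs.drop j1).take (j2 - j1)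
          ++ ['<','b','r','>'] ++ (cs.drop j2).take (j3 - j2)
          ++ ['<','b','r','>'] ++ cs.drop (j3 + 1) := by
  have hj1n : j1 < cs.length := pvGetLt hsp1
  have hj2n : j2 < cs.length := pvGetLt hsp2
  have hj3n : j3 < cs.length := pvGetLt hsp3
  have hlenS1 : ((cs.drop j1).take (j2 - j1)).length = j2 - j1 := by
    rw [List.length_take, List.length_drop]; omega
  have hlenS2 : ((cs.drop j2).take (j3 - j2)).length = j3 - j2 := by
    rw [List.length_take, List.length_drop]; omega
  have hX : cs.take j1 ++ ((cs.drop j1).take (j2 - j1)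
      ++ ((cs.drop j2).take (j3 - j2) ++ cs.drop j3)) = cs := by
    rw [pvSeg_split cs j2 j3 (by omega), pvSeg_split cs j1 j2 (by omega),
      List.take_append_drop]
  calc pvBuildB cs 0 (some j1) (some j2) (some j3)
      = pvBuildB (cs.take j1 ++ ((cs.drop j1).take (j2 - j1)
          ++ ((cs.drop j2).take (j3 - j2) ++ cs.drop j3))) 0
          (some j1) (some j2) (some j3) :=
        congrArg (fun l => pvBuildB l 0 (some j1) (some j2) (some j3)) hX.symm
    _ = cs.take j1 ++ ['<','b','r','>'] ++ (cs.drop j1).take (j2 - j1)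
          ++ ['<','b','r','>'] ++ (cs.drop j2).take (j3 - j2)
          ++ ['<','b','r','>'] ++ cs.drop (j3 + 1) := by
        rw [pvBuild_append, pvLenTake cs j1 (by omega),
          pvBuild_copy _ _ _ _ 0 (by
            intro i _ h2
            rw [pvLenTake cs j1 (by omega)] at h2
            refine ⟨by simp; omega, by simp; omega, by simp; omega⟩),
          Nat.zero_add, pvBuild_append, hlenS1,
          show j1 + (j2 - j1) = j2 by omega,
          pvBuild_keep cs (some j1) (some j2) (some j3) j1 j2 hsp1 (Or.inl rfl)
            (by intro i hi1 hi2
                refine ⟨by simp; omega, by simp; omega, by simp; omega⟩)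
            h12,
          pvBuild_append, hlenS2,
          show j2 + (j3 - j2) = j3 by omega,
          pvBuild_keep cs (some j1) (some j2) (some j3) j2 j3 hsp2 (Or.inr rfl)
            (by intro i hi1 hi2
                refine ⟨by simp; omega, by simp; omega, by simp; omega⟩)
            h23,
          pvBuild_last cs (some j1) (some j2) (some j3) j3 hsp3 rfl
            (by simp; omega) (by simp; omega)
            (by intro i hi
                refine ⟨by simp; omega, by simp; omega, by simp; omega⟩)]
        simp [List.append_assoc]

-- ===== VERDICT (by name: the statement is the Claim_ definition above) =====
theorem parse_title_spec : Claim_equal_parse_title := by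
  intro title _
  unfold Spec_parse_title
  by_cases hlen : title.toList.length < 80
  · unfold parse_title parse_title_alt
    rw [if_pos hlen, if_pos hlen]
  · rw [pvA_eq_build title hlen]
    simp only [parse_title_alt]
    rw [if_neg hlen]
    have hff1 := pvFindFrom_eq title.toList 61 120
    have hff2 := pvFindFrom_eq title.toList 121 180
    have hff3 := pvFindFrom_none_eq title.toList 181
    simp only [Nat.cast_ofNat] at hff1 hff2 hff3
    rcases hb1 : pvFirstSpace title.toList 61 120 0 with _ | j1
    · have hB1 : pvB1 title.toList = none := hb1
      have hB2 : pvB2 title.toList = none := by simp [pvB2, hB1]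
      have hB3 : pvB3 title.toList = pvFirstSpace title.toList 181 title.toList.length 0 := by
        simp [pvB3, hB1]
      rw [hb1] at hff1
      rw [hff1, if_pos rfl]
      rcases hb3 : pvFirstSpace title.toList 181 title.toList.length 0 with _ | j3
      · rw [hb3] at hff3
        rw [hff3, if_pos rfl, hB1, hB2, hB3, hb3, pvAssmNone]
        simp
      · rw [hb3] at hff3
        have hsp3 : title.toList[j3]? = some ' ' := by
          simpa using (pvFirstSpace_some _ _ _ _ _ hb3).2.2.2.1
        rw [hff3, if_neg (show ¬((j3 : Int) = -1) by omega), hB1, hB2, hB3, hb3,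
          pvAssm0 _ _ hsp3,
          PySem.List.slice_to_natCast,
          show ((j3 : Int) + 1) = ((j3 + 1 : Nat) : Int) by push_cast; ring,
          PySem.List.slice_from_natCast]
    · have hB1 : pvB1 title.toList = some j1 := hb1
      obtain ⟨hj1a, hj1b, hsp1, _⟩ := pvB1_some hB1
      rw [hb1] at hff1
      rw [hff1, if_neg (show ¬((j1 : Int) = -1) by omega)]
      have hB2eq : pvB2 title.toList = pvFirstSpace title.toList 121 180 0 := by
        simp [pvB2, hB1]
      rcases hb2 : pvFirstSpace title.toList 121 180 0 with _ | j2
      · have hB2 : pvB2 title.toList = none := hB2eq.trans hb2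
        have hB3 : pvB3 title.toList = none := by simp [pvB3, hB1, hB2]
        rw [hb2] at hff2
        rw [hff2, if_pos rfl, hB1, hB2, hB3, pvAssm1 _ _ hsp1,
          PySem.List.slice_to_natCast, PySem.List.slice_from_natCast]
      · have hB2 : pvB2 title.toList = some j2 := hB2eq.trans hb2
        obtain ⟨hj2a, hj2b, hsp2, _, _⟩ := pvB2_some hB2
        have hB3eq : pvB3 title.toList
            = pvFirstSpace title.toList 181 title.toList.length 0 := by
          simp [pvB3, hB1, hB2]
        rw [hb2] at hff2
        rw [hff2, if_neg (show ¬((j2 : Int) = -1) by omega)]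
        rcases hb3 : pvFirstSpace title.toList 181 title.toList.length 0 with _ | j3
        · have hB3 : pvB3 title.toList = none := hB3eq.trans hb3
          rw [hb3] at hff3
          rw [hff3, if_pos rfl, hB1, hB2, hB3,
            pvAssm2 _ _ _ hsp1 hsp2 (by omega),
            PySem.List.slice_to_natCast, PySem.List.slice_natCast,
            PySem.List.slice_from_natCast]
        · have hB3 : pvB3 title.toList = some j3 := hB3eq.trans hb3
          obtain ⟨hj3a, hsp3, _, _⟩ := pvB3_some hB3
          rw [hb3] at hff3
          rw [hff3, if_neg (show ¬((j3 : Int) = -1) by omega), hB1, hB2, hB3,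
            pvAssm3 _ _ _ _ hsp1 hsp2 hsp3 (by omega) (by omega),
            PySem.List.slice_to_natCast, PySem.List.slice_natCast,
            PySem.List.slice_natCast,
            show ((j3 : Int) + 1) = ((j3 + 1 : Nat) : Int) by push_cast; ring,
            PySem.List.slice_from_natCast]
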